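-- pv_equiv track=rewrite | github.com/donmccaughey/donm_cc | gen/html/wrap.py | wrap_tokens
-- ===== SOURCE A (Python) =====
-- from typing import List
--
-- def wrap_tokens(tokens: List[str], width: int) -> List[str]:
--     wrapped = []
--     line_len = 0
--     end_of_sentence = False
--     for token in tokens:
--         if token.endswith('.'):
--             end_of_sentence = True
--         if line_len + len(token) < width:
--             if token.isspace():
--                 if end_of_sentence:
--                     token = '  '
--                 end_of_sentence = False
--             wrapped.append(token)
--             line_len += len(token)
--         elif line_len + len(token) == width:
--             if token.isspace():
--                 wrapped.append('\n')
--                 line_len = 0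
--                 end_of_sentence = False
--             else:
--                 wrapped.append(token)
--                 line_len += len(token)
--         else:
--             if token.isspace():
--                 wrapped += '\n'
--                 line_len = 0
--                 end_of_sentence = False
--             else:
--                 if wrapped:
--                     i = len(wrapped) - 1
--                     while i > 0 and wrapped[i] != '\n':
--                         if wrapped[i].isspace():
--                             wrapped[i] = '\n'
--                             line_len = sum(
--                                 [len(token) for token in wrapped[i + 1:]])
--                             break
--                         i -= 1
--                 wrapped.append(token)
--                 line_len += len(token)
--     return wrapped
-- ===== SOURCE B (Python) =====
-- from typing import List
--
--
-- def wrap_tokens(tokens: List[str], width: int) -> List[str]: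
--     # One pass: remember the index of the last breakable whitespace token on the
--     # current line and the line length after it, so a break costs O(1) instead of
--     # rescanning the output list.
--     wrapped = []
--     line_len = 0
--     end_of_sentence = False
--     last_ws = -1      # index in wrapped of the last break candidate on this line
--     len_after = 0     # total length of tokens appended after wrapped[last_ws]
--     for token in tokens:
--         if token.endswith('.'):
--             end_of_sentence = True
--         n = len(token)
--         if token.isspace():
--             if line_len + n < width:
--                 if end_of_sentence:
--                     token = '  '
--                     n = 2
--                 end_of_sentence = False
--                 if token == '\n':
--                     last_ws = -1      # an explicit newline token is a hard break
--                 elif wrapped: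
--                     last_ws = len(wrapped)
--                     len_after = 0
--                 wrapped.append(token)
--                 line_len += n
--             else:
--                 wrapped.append('\n')
--                 line_len = 0
--                 end_of_sentence = False
--                 last_ws = -1
--         else:
--             if line_len + n <= width or last_ws < 0:
--                 wrapped.append(token)
--                 line_len += n
--                 len_after += n
--             else:
--                 wrapped[last_ws] = '\n'
--                 wrapped.append(token)
--                 line_len = len_after + n
--                 last_ws = -1
--                 len_after = n
--     return wrapped
-- ===== Notes on version B (the rewrite author's own statement) =====
-- stated objective: faster
-- what changed: B tracks the index of the last breakable whitespace token on the current line and the line length after it, so an overflow break is O(1) instead of A's backward rescan of the output list plus re-summation of the tail.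
import Mathlib
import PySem

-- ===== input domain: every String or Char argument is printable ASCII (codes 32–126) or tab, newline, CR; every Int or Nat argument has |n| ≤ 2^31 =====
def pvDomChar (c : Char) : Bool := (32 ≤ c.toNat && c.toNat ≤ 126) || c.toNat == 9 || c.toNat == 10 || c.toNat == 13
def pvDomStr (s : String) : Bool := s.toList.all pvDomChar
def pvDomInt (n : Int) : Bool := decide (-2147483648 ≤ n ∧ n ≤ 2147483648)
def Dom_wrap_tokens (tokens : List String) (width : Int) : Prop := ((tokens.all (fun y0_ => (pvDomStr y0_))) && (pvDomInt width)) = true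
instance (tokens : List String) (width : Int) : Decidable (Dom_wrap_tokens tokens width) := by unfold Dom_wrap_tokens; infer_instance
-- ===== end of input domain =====

-- B replaces A's backward rescan of the output at each overflow (plus its O(line)
-- re-summation) with O(1) tracking of the last break candidate: objective = faster.

-- ===== PORT A =====
-- sum([len(token) for token in l])
def pvSumLens (l : List String) : Int := (l.map PySem.Str.len).sum

-- A's inner 'while i > 0 and wrapped[i] != "\n"' loop, recursing on i downward.
-- wrapped[i] is always in range here (i < wrapped.length), so List.getD is exact;
-- wrapped[i+1:] with i+1 ≥ 0 is exactly List.drop (i+1).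
def pvScanA (wrapped : List String) (line_len : Int) : Nat → List String × Int
  | 0 => (wrapped, line_len)
  | i+1 =>
    if wrapped.getD (i+1) "" = "\n" then (wrapped, line_len)
    else if PySem.Str.strIsspace (wrapped.getD (i+1) "") then
      (wrapped.set (i+1) "\n", pvSumLens (wrapped.drop (i+2)))
    else pvScanA wrapped line_len i

-- one iteration of A's 'for token in tokens' loop; state = (wrapped, line_len, end_of_sentence)
def pvStepA (width : Int) (st : List String × Int × Bool) (token : String) : List String × Int × Bool :=
  let wrapped := st.1
  let line_len := st.2.1
  let eos := if PySem.Str.endswith token "." then true else st.2.2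
  if line_len + PySem.Str.len token < width then
    if PySem.Str.strIsspace token then
      let token' := if eos then "  " else token
      (wrapped ++ [token'], line_len + PySem.Str.len token', false)
    else
      (wrapped ++ [token], line_len + PySem.Str.len token, eos)
  else if line_len + PySem.Str.len token = width then
    if PySem.Str.strIsspace token then
      (wrapped ++ ["\n"], 0, false)
    else
      (wrapped ++ [token], line_len + PySem.Str.len token, eos)
  else
    if PySem.Str.strIsspace token then
      -- 'wrapped += "\n"' extends with the single character '\n'
      (wrapped ++ ["\n"], 0, false)
    else
      let p := if wrapped ≠ [] then pvScanA wrapped line_len (wrapped.length - 1)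
               else (wrapped, line_len)
      (p.1 ++ [token], p.2 + PySem.Str.len token, eos)

def wrap_tokens (tokens : List String) (width : Int) : List String :=
  (tokens.foldl (pvStepA width) ([], 0, false)).1

-- ===== PORT B =====
-- one iteration of B's loop; state = (wrapped, line_len, end_of_sentence, last_ws, len_after)
def pvStepB (width : Int) (st : List String × Int × Bool × Int × Int) (token : String) :
    List String × Int × Bool × Int × Int :=
  let wrapped := st.1
  let line_len := st.2.1
  let eos := if PySem.Str.endswith token "." then true else st.2.2.1
  let lw := st.2.2.2.1
  let la := st.2.2.2.2
  let n := PySem.Str.len token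
  if PySem.Str.strIsspace token then
    if line_len + n < width then
      let token' := if eos then "  " else token
      let n' := if eos then (2 : Int) else n
      if token' = "\n" then
        (wrapped ++ [token'], line_len + n', false, -1, la)
      else if wrapped ≠ [] then
        (wrapped ++ [token'], line_len + n', false, (wrapped.length : Int), 0)
      else
        (wrapped ++ [token'], line_len + n', false, lw, la)
    else
      (wrapped ++ ["\n"], 0, false, -1, la)
  else
    if line_len + n ≤ width ∨ lw < 0 then
      (wrapped ++ [token], line_len + n, eos, lw, la + n)
    else
      -- wrapped[last_ws] = '\n' with 0 ≤ last_ws < len(wrapped): List.set is exact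
      ((wrapped.set lw.toNat "\n") ++ [token], la + n, eos, -1, n)

def wrap_tokens_alt (tokens : List String) (width : Int) : List String :=
  (tokens.foldl (pvStepB width) ([], 0, false, -1, 0)).1

-- ===== PRECONDITION & SPEC =====
def Spec_wrap_tokens (tokens : List String) (width : Int) (out : List String) : Prop := out = wrap_tokens_alt tokens width
instance (tokens : List String) (width : Int) (out : List String) : Decidable (Spec_wrap_tokens tokens width out) := by unfold Spec_wrap_tokens; infer_instance

-- ===== CLAIM (what is proved, stated in full; the proofs are below) =====
def Claim_equal_wrap_tokens : Prop := ∀ (tokens : List String) (width : Int), Dom_wrap_tokens tokens width → Spec_wrap_tokens tokens width (wrap_tokens tokens width)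

-- ===== LEMMAS AND PROOFS =====

-- No break candidate on the current line: every whitespace element at a positive
-- index (other than a literal "\n", at which A's scan stops) is shielded by a later "\n".
def pvNoCand (w : List String) : Prop :=
  ∀ k, 0 < k → k < w.length → PySem.Str.strIsspace (w.getD k "") = true →
    w.getD k "" ≠ "\n" → ∃ m, k < m ∧ m < w.length ∧ w.getD m "" = "\n"

-- the relation between B's (last_ws, len_after) and the output list built so far
def pvInv (w : List String) (lw la : Int) : Prop :=
  (lw = -1 ∧ pvNoCand w) ∨
  (∃ u s v, w = u ++ s :: v ∧ lw = (u.length : Int) ∧ 0 < u.length ∧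
    PySem.Str.strIsspace s = true ∧ s ≠ "\n" ∧
    (∀ t ∈ v, PySem.Str.strIsspace t = false) ∧ la = pvSumLens v)

lemma pvScanA_eq_of_nocand (w : List String) (l : Int) :
    ∀ i, (∀ k, 0 < k → k ≤ i → PySem.Str.strIsspace (w.getD k "") = true →
            w.getD k "" ≠ "\n" → ∃ m, k < m ∧ m ≤ i ∧ w.getD m "" = "\n") →
    pvScanA w l i = (w, l) := by
  intro i
  induction i with
  | zero => intro _; rfl
  | succ i ih =>
    intro h
    by_cases h1 : w.getD (i+1) "" = "\n"
    · simp only [pvScanA]; rw [if_pos h1]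
    · by_cases h2 : PySem.Str.strIsspace (w.getD (i+1) "") = true
      · obtain ⟨m, hm1, hm2, _⟩ := h (i+1) (Nat.succ_pos i) le_rfl h2 h1
        omega
      · simp only [pvScanA]; rw [if_neg h1, if_neg h2]
        apply ih
        intro k hk0 hki hsp hne
        obtain ⟨m, hm1, hm2, hm3⟩ := h k hk0 (Nat.le_succ_of_le hki) hsp hne
        refine ⟨m, hm1, ?_, hm3⟩
        rcases Nat.lt_or_ge m (i+1) with h' | h'
        · omega
        · have : m = i + 1 := by omega
          subst this
          exfalso; apply h2
          rw [hm3]; decide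

lemma pvScanA_step_down (w : List String) (l : Int) (i : Nat)
    (hns : PySem.Str.strIsspace (w.getD (i+1) "") = false) :
    pvScanA w l (i+1) = pvScanA w l i := by
  have h1 : w.getD (i+1) "" ≠ "\n" := by
    intro h; rw [h] at hns; exact absurd hns (by decide)
  simp only [pvScanA]
  rw [if_neg h1, if_neg (by rw [hns]; exact Bool.false_ne_true)]

lemma pvScanA_from (w : List String) (l : Int) (j : Nat) :
    ∀ d, (∀ k, j < k → k ≤ j + d → PySem.Str.strIsspace (w.getD k "") = false) →
    pvScanA w l (j + d) = pvScanA w l j := by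
  intro d
  induction d with
  | zero => intro _; rfl
  | succ d ih =>
    intro h
    have : j + (d + 1) = (j + d) + 1 := by omega
    rw [this, pvScanA_step_down w l (j + d) (h (j + d + 1) (by omega) (by omega))]
    exact ih (fun k hk1 hk2 => h k hk1 (by omega))

lemma pvGetD_mem (l : List String) (k : Nat) (h : k < l.length) : l.getD k "" ∈ l := by
  rw [List.getD_eq_getElem l "" h]; exact List.getElem_mem h

lemma pvSet_middle (u : List String) (s x : String) (v : List String) :
    (u ++ s :: v).set u.length x = u ++ x :: v := by
  rw [List.set_append_right _ _ (le_refl u.length)]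
  simp

lemma pvScanA_cand (u : List String) (s : String) (v : List String) (l : Int)
    (hu : 0 < u.length) (hs : PySem.Str.strIsspace s = true) (hsn : s ≠ "\n")
    (hv : ∀ t ∈ v, PySem.Str.strIsspace t = false) :
    pvScanA (u ++ s :: v) l (u.length + v.length) = (u ++ "\n" :: v, pvSumLens v) := by
  have hget : ∀ k, u.length < k → k ≤ u.length + v.length →
      (u ++ s :: v).getD k "" = v.getD (k - u.length - 1) "" := by
    intro k hk1 hk2
    rw [List.getD_eq_getElem?_getD, List.getD_eq_getElem?_getD,
        List.getElem?_append_right (by omega)]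
    congr 1
    have h : k - u.length = (k - u.length - 1) + 1 := by omega
    rw [h]
    simp
  rw [pvScanA_from (u ++ s :: v) l u.length v.length]
  · have hgs : (u ++ s :: v).getD u.length "" = s := by
      rw [List.getD_eq_getElem?_getD, List.getElem?_append_right (le_refl u.length)]
      simp
    obtain ⟨j, hj⟩ : ∃ j, u.length = j + 1 := ⟨u.length - 1, by omega⟩
    have hgs' : (u ++ s :: v).getD (j+1) "" = s := by rw [← hj]; exact hgs
    have hset : (u ++ s :: v).set (j+1) "\n" = u ++ "\n" :: v := by
      rw [← hj]; exact pvSet_middle u s "\n" v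
    have hdrop : (u ++ s :: v).drop (j+2) = v := by
      have : j + 2 = u.length + 1 := by omega
      rw [this]; simp [List.drop_append]
    rw [hj]
    simp only [pvScanA, hgs', hs, hsn, if_pos, hset, hdrop]
    simp
  · intro k hk1 hk2
    rw [hget k hk1 hk2]
    exact hv _ (pvGetD_mem v _ (by omega))

lemma pvInv_nil : pvInv [] (-1) 0 := by
  left
  exact ⟨rfl, fun k hk0 hk _ _ => by simp at hk⟩

lemma pvSumLens_append (v : List String) (t : String) :
    pvSumLens (v ++ [t]) = pvSumLens v + PySem.Str.len t := by
  simp [pvSumLens]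

-- appending a non-whitespace element preserves "no candidate"
lemma pvNoCand_append_nonspace (w : List String) (t : String)
    (hw : pvNoCand w) (ht : PySem.Str.strIsspace t = false) : pvNoCand (w ++ [t]) := by
  intro k hk0 hk hsp hne
  rcases Nat.lt_or_ge k w.length with h | h
  · obtain ⟨m, hm1, hm2, hm3⟩ := hw k hk0 h (by rwa [List.getD_append _ _ _ _ h] at hsp)
      (by rwa [List.getD_append _ _ _ _ h] at hne)
    exact ⟨m, hm1, by simp; omega, by rwa [List.getD_append _ _ _ _ hm2]⟩
  · exfalso
    have hk' : k = w.length := by simp at hk; omega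
    have hg : (w ++ [t]).getD k "" = t := by
      subst hk'
      rw [List.getD_eq_getElem?_getD, List.getElem?_append_right le_rfl]
      simp
    rw [hg] at hsp
    rw [hsp] at ht
    exact absurd ht (by decide)

lemma pvNoCand_append_newline (w : List String) : pvNoCand (w ++ ["\n"]) := by
  intro k hk0 hk hsp hne
  rcases Nat.lt_or_ge k w.length with h | h
  · refine ⟨w.length, h, by simp, ?_⟩
    rw [List.getD_eq_getElem?_getD, List.getElem?_append_right le_rfl]
    simp
  · exfalso
    have hk' : k = w.length := by simp at hk; omega
    apply hne
    subst hk'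
    rw [List.getD_eq_getElem?_getD, List.getElem?_append_right le_rfl]
    simp

lemma pvNoCand_break (u : List String) (v : List String) (t : String)
    (hv : ∀ x ∈ v, PySem.Str.strIsspace x = false) (ht : PySem.Str.strIsspace t = false) :
    pvNoCand ((u ++ "\n" :: v) ++ [t]) := by
  intro k hk0 hk hsp hne
  have hlen : ((u ++ "\n" :: v) ++ [t]).length = u.length + v.length + 2 := by simp; omega
  rcases Nat.lt_or_ge k u.length with h | h
  · refine ⟨u.length, h, by omega, ?_⟩
    rw [List.getD_eq_getElem?_getD, List.getElem?_append_left (l₂ := [t]) (by simp),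
        List.getElem?_append_right (le_refl u.length)]
    simp
  · exfalso
    rcases Nat.lt_or_ge k (u.length + v.length + 1) with h2 | h2
    · rcases Nat.eq_or_lt_of_le h with h3 | h3
      · apply hne
        rw [List.getD_eq_getElem?_getD, List.getElem?_append_left (by simp; omega),
            List.getElem?_append_right (by omega)]
        simp [← h3]
      · have hget : ((u ++ "\n" :: v) ++ [t]).getD k "" = v.getD (k - u.length - 1) "" := by
          rw [List.getD_eq_getElem?_getD, List.getD_eq_getElem?_getD,
              List.getElem?_append_left (by simp; omega),
              List.getElem?_append_right (by omega)]
          congr 1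
          have hh : k - u.length = (k - u.length - 1) + 1 := by omega
          rw [hh]; simp
        rw [hget] at hsp
        rw [hv _ (pvGetD_mem v _ (by omega))] at hsp
        exact absurd hsp (by decide)
    · have hk' : k = u.length + v.length + 1 := by omega
      have hg : ((u ++ "\n" :: v) ++ [t]).getD k "" = t := by
        subst hk'
        rw [List.getD_eq_getElem?_getD, List.getElem?_append_right (by simp; omega)]
        simp
      rw [hg] at hsp
      rw [hsp] at ht
      exact absurd ht (by decide)

-- one loop iteration preserves the relation between A's and B's states
lemma pvStep_rel (width : Int) (token : String) (w : List String) (l : Int) (e : Bool)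
    (lw la : Int) (hInv : pvInv w lw la) :
    (pvStepA width (w, l, e) token).1 = (pvStepB width (w, l, e, lw, la) token).1 ∧
    (pvStepA width (w, l, e) token).2.1 = (pvStepB width (w, l, e, lw, la) token).2.1 ∧
    (pvStepA width (w, l, e) token).2.2 = (pvStepB width (w, l, e, lw, la) token).2.2.1 ∧
    pvInv (pvStepB width (w, l, e, lw, la) token).1
      (pvStepB width (w, l, e, lw, la) token).2.2.2.1
      (pvStepB width (w, l, e, lw, la) token).2.2.2.2 := by
  by_cases hsp : PySem.Chars.strIsspace token.toList = true
  · by_cases hlt : l + (token.length : Int) < width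
    · -- whitespace token that fits: both sides append token' and reset eos
      by_cases hE : PySem.Chars.endswith token.toList ['.'] = true ∨ e = true
      · -- end of sentence: token' = "  "
        have hnn : ("  " : String) ≠ "\n" := by decide
        by_cases hw : w = []
        · have hlw : lw = -1 := by
            rcases hInv with ⟨h1, _⟩ | ⟨u, s, v, hw', _⟩
            · exact h1
            · rw [hw] at hw'; exact absurd hw' (by simp)
          have hA : pvStepA width (w, l, e) token = (["  "], l + 2, false) := by
            subst hw; simp [pvStepA, hsp, hlt, hE]
          have hB : pvStepB width (w, l, e, lw, la) token = (["  "], l + 2, false, lw, la) := by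
            subst hw; simp [pvStepB, hsp, hlt, hE, hnn]
          rw [hA, hB]
          refine ⟨rfl, rfl, rfl, Or.inl ⟨hlw, ?_⟩⟩
          intro k hk0 hk _ _
          simp at hk
          omega
        · have hA : pvStepA width (w, l, e) token = (w ++ ["  "], l + 2, false) := by
            simp [pvStepA, hsp, hlt, hE]
          have hB : pvStepB width (w, l, e, lw, la) token =
              (w ++ ["  "], l + 2, false, (w.length : Int), 0) := by
            simp [pvStepB, hsp, hlt, hE, hnn, hw]
          rw [hA, hB]
          refine ⟨rfl, rfl, rfl, Or.inr ?_⟩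
          exact ⟨w, "  ", [], by simp, rfl, List.length_pos_iff.mpr hw, by decide, hnn,
            by simp, by simp [pvSumLens]⟩
      · -- not end of sentence: token' = token
        have hspS : PySem.Str.strIsspace token = true := by simpa using hsp
        by_cases htn : token = "\n"
        · subst htn
          have he : e = false := by
            rcases Bool.eq_false_or_eq_true e with h | h
            · exact absurd (Or.inr h) hE
            · exact h
          subst he
          have hlt1 : l + 1 < width := by simpa using hlt
          have hA : pvStepA width (w, l, false) "\n" = (w ++ ["\n"], l + 1, false) := by
            simp [pvStepA, hlt1, (show PySem.Chars.strIsspace ['\n'] = true by decide),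
              (show PySem.Chars.endswith ['\n'] ['.'] = false by decide)]
          have hB : pvStepB width (w, l, false, lw, la) "\n" =
              (w ++ ["\n"], l + 1, false, -1, la) := by
            simp [pvStepB, hlt1, (show PySem.Chars.strIsspace ['\n'] = true by decide),
              (show PySem.Chars.endswith ['\n'] ['.'] = false by decide)]
          rw [hA, hB]
          exact ⟨rfl, rfl, rfl, Or.inl ⟨rfl, pvNoCand_append_newline w⟩⟩
        · by_cases hw : w = []
          · have hlw : lw = -1 := by
              rcases hInv with ⟨h1, _⟩ | ⟨u, s, v, hw', _⟩
              · exact h1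
              · rw [hw] at hw'; exact absurd hw' (by simp)
            have hA : pvStepA width (w, l, e) token =
                ([token], l + (token.length : Int), false) := by
              subst hw; simp [pvStepA, hsp, hlt, hE]
            have hB : pvStepB width (w, l, e, lw, la) token =
                ([token], l + (token.length : Int), false, lw, la) := by
              subst hw; simp [pvStepB, hsp, hlt, hE, htn]
            rw [hA, hB]
            refine ⟨rfl, rfl, rfl, Or.inl ⟨hlw, ?_⟩⟩
            intro k hk0 hk _ _
            simp at hk
            omega
          · have hA : pvStepA width (w, l, e) token =
                (w ++ [token], l + (token.length : Int), false) := by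
              simp [pvStepA, hsp, hlt, hE]
            have hB : pvStepB width (w, l, e, lw, la) token =
                (w ++ [token], l + (token.length : Int), false, (w.length : Int), 0) := by
              simp [pvStepB, hsp, hlt, hE, htn, hw]
            rw [hA, hB]
            refine ⟨rfl, rfl, rfl, Or.inr ?_⟩
            exact ⟨w, token, [], by simp, rfl, List.length_pos_iff.mpr hw, hspS, htn,
              by simp, by simp [pvSumLens]⟩
    · -- whitespace token that does not fit: both sides append "\n" and reset
      have hA : pvStepA width (w, l, e) token = (w ++ ["\n"], 0, false) := by
        by_cases heq : l + (token.length : Int) = width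
        · simp [pvStepA, hsp, heq]
        · simp [pvStepA, hsp, hlt, heq]
      have hB : pvStepB width (w, l, e, lw, la) token = (w ++ ["\n"], 0, false, -1, la) := by
        simp [pvStepB, hsp, hlt]
      rw [hA, hB]
      exact ⟨rfl, rfl, rfl, Or.inl ⟨rfl, pvNoCand_append_newline w⟩⟩
  · -- non-whitespace token
    have hspS : PySem.Str.strIsspace token = false := by
      simp only [PySem.Str.strIsspace_eq]
      rwa [Bool.not_eq_true] at hsp
    by_cases hle : l + (token.length : Int) ≤ width
    · -- fits (strictly or exactly): both sides append
      have hA : pvStepA width (w, l, e) token =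
          (w ++ [token], l + (token.length : Int),
            PySem.Chars.endswith token.toList ['.'] || e) := by
        by_cases hlt : l + (token.length : Int) < width
        · simp [pvStepA, hsp, hlt]
        · have heq : l + (token.length : Int) = width := by omega
          simp [pvStepA, hsp, heq]
      have hB : pvStepB width (w, l, e, lw, la) token =
          (w ++ [token], l + (token.length : Int),
            PySem.Chars.endswith token.toList ['.'] || e, lw, la + (token.length : Int)) := by
        have hcond : l + (token.length : Int) ≤ width ∨ lw < 0 := Or.inl hle
        simp [pvStepB, hsp, hcond]
      rw [hA, hB]
      refine ⟨rfl, rfl, rfl, ?_⟩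
      rcases hInv with ⟨hlw, hnc⟩ | ⟨u, s, v, hw, hlw, hu, hs, hsn, hv, hla⟩
      · exact Or.inl ⟨hlw, pvNoCand_append_nonspace w token hnc hspS⟩
      · right
        refine ⟨u, s, v ++ [token], by rw [hw]; simp, hlw, hu, hs, hsn, ?_, ?_⟩
        · intro x hx
          rcases List.mem_append.mp hx with h | h
          · exact hv x h
          · rw [List.mem_singleton.mp h]; exact hspS
        · rw [pvSumLens_append, hla]
          simp
    · -- overflow on a non-whitespace token
      have hlt : ¬ l + (token.length : Int) < width := by omega
      have heq : ¬ l + (token.length : Int) = width := by omega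
      rcases hInv with ⟨hlw, hnc⟩ | ⟨u, s, v, hw, hlw, hu, hs, hsn, hv, hla⟩
      · -- no break candidate: A's scan finds nothing, B appends
        have hB : pvStepB width (w, l, e, lw, la) token =
            (w ++ [token], l + (token.length : Int),
              PySem.Chars.endswith token.toList ['.'] || e, lw, la + (token.length : Int)) := by
          have hcond : l + (token.length : Int) ≤ width ∨ lw < 0 := Or.inr (by omega)
          simp [pvStepB, hsp, hcond]
        have hA : pvStepA width (w, l, e) token =
            (w ++ [token], l + (token.length : Int),
              PySem.Chars.endswith token.toList ['.'] || e) := by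
          by_cases hwnil : w = []
          · subst hwnil
            simp [pvStepA, hsp, hlt, heq]
          · have hscan : pvScanA w l (w.length - 1) = (w, l) := by
              apply pvScanA_eq_of_nocand
              intro k hk0 hki hspk hnek
              have hwlen : 0 < w.length := List.length_pos_iff.mpr hwnil
              obtain ⟨m, hm1, hm2, hm3⟩ := hnc k hk0 (by omega) hspk hnek
              exact ⟨m, hm1, by omega, hm3⟩
            simp [pvStepA, hsp, hlt, heq, hwnil, hscan]
        rw [hA, hB]
        exact ⟨rfl, rfl, rfl, Or.inl ⟨hlw, pvNoCand_append_nonspace w token hnc hspS⟩⟩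
      · -- break candidate at index u.length: A's scan replaces it, B sets it directly
        have hwnil : w ≠ [] := by rw [hw]; simp
        have hidx : w.length - 1 = u.length + v.length := by rw [hw]; simp
        have hscan : pvScanA w l (w.length - 1) = (u ++ "\n" :: v, pvSumLens v) := by
          rw [hidx, hw]
          exact pvScanA_cand u s v l hu hs hsn hv
        have hA : pvStepA width (w, l, e) token =
            ((u ++ "\n" :: v) ++ [token], pvSumLens v + (token.length : Int),
              PySem.Chars.endswith token.toList ['.'] || e) := by
          simp [pvStepA, hsp, hlt, heq, hwnil, hscan]
        have hB : pvStepB width (w, l, e, lw, la) token =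
            ((u ++ "\n" :: v) ++ [token], la + (token.length : Int),
              PySem.Chars.endswith token.toList ['.'] || e, -1, (token.length : Int)) := by
          have hcond : ¬ (l + (token.length : Int) ≤ width ∨ lw < 0) := by
            push Not
            exact ⟨by omega, by rw [hlw]; positivity⟩
          have hset : w.set lw.toNat "\n" = u ++ "\n" :: v := by
            rw [hw, hlw]
            have hn : ((u.length : Int)).toNat = u.length := by omega
            rw [hn]
            exact pvSet_middle u s "\n" v
          simp [pvStepB, hsp, hcond, hset]
        rw [hA, hB]
        exact ⟨rfl, by rw [hla], rfl, Or.inl ⟨rfl, pvNoCand_break u v token hv hspS⟩⟩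

lemma pvFold_rel (width : Int) (tokens : List String) :
    ∀ (w : List String) (l : Int) (e : Bool) (lw la : Int), pvInv w lw la →
    (tokens.foldl (pvStepA width) (w, l, e)).1 =
      (tokens.foldl (pvStepB width) (w, l, e, lw, la)).1 := by
  induction tokens with
  | nil => intro w l e lw la _; rfl
  | cons t ts ih =>
    intro w l e lw la hInv
    obtain ⟨h1, h2, h3, h4⟩ := pvStep_rel width t w l e lw la hInv
    simp only [List.foldl_cons]
    have hA : pvStepA width (w, l, e) t =
        ((pvStepB width (w, l, e, lw, la) t).1, (pvStepB width (w, l, e, lw, la) t).2.1,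
         (pvStepB width (w, l, e, lw, la) t).2.2.1) := by
      exact Prod.ext h1 (Prod.ext h2 h3)
    rw [hA]
    exact ih _ _ _ _ _ h4

-- ===== VERDICT (by name: the statement is the Claim_ definition above) =====
theorem wrap_tokens_spec : Claim_equal_wrap_tokens := by
  intro tokens width _
  unfold Spec_wrap_tokens wrap_tokens wrap_tokens_alt
  exact pvFold_rel width tokens [] 0 false (-1) 0 pvInv_nil
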